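-- pv_equiv track=rewrite | github.com/rudactor/VirtualAssistant_Titan | backend/chat_engine.py | _last_window
-- ===== SOURCE A (Python) =====
-- from typing import List, Tuple
--
-- def _last_window(pairs: List[Tuple[str, str]], budget: int) -> List[Tuple[str, str]]:
--     acc: List[Tuple[str, str]] = []; used = 0
--     for role, content in reversed(pairs):
--         L = len(content)
--         if used + L > budget:
--             if not acc and budget > 200:
--                 acc.append((role, content[-budget:]))
--             break
--         acc.append((role, content)); used += L
--     return list(reversed(acc))
-- ===== SOURCE B (Python) =====
-- from typing import List, Tuple
--
-- def _last_window(pairs: List[Tuple[str, str]], budget: int) -> List[Tuple[str, str]]: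
--     # Forward pass: prefix sums of content lengths; then binary search for the
--     # smallest cut index i with total - prefix[i] <= budget (valid because
--     # lengths are nonnegative, so suffix sums are monotone), and slice.
--     n = len(pairs)
--     prefix = [0]
--     for _, content in pairs:
--         prefix.append(prefix[-1] + len(content))
--     total = prefix[n]
--     need = total - budget
--     lo, hi = 0, n + 1          # hi = n+1 acts as "no index fits"
--     while lo < hi:
--         mid = (lo + hi) // 2
--         if prefix[mid] >= need:
--             hi = mid
--         else:
--             lo = mid + 1
--     if lo >= n:                # nothing (or only the empty suffix) fits
--         if n > 0 and budget > 200: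
--             role, content = pairs[-1]
--             return [(role, content[-budget:])]
--         return []
--     return pairs[lo:]
-- ===== Notes on version B (the rewrite author's own statement) =====
-- stated objective: alternative
-- what changed: A scans the pairs in reverse, appending each still-fitting pair to an accumulator and reversing it at the end; B instead builds prefix sums of the content lengths in one forward pass, binary-searches for the smallest cut index whose suffix fits the budget (valid since lengths are nonnegative, so suffix sums are monotone), and returns a direct slice, with the >200 truncation fallback as a separate case.
import Mathlib
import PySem

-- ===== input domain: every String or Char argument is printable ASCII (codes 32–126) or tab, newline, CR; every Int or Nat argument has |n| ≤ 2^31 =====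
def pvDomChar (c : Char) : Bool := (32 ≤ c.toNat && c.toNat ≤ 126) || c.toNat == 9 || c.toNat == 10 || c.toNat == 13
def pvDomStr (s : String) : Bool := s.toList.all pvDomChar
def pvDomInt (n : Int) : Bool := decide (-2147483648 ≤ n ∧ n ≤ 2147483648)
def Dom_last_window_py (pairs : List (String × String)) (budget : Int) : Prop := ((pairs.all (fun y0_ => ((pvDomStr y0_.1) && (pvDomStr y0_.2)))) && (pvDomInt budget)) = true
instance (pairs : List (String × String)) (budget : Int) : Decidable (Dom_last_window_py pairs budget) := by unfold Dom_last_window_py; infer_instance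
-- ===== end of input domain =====

-- B replaces A's reverse accumulate-and-break loop by a forward prefix-sum pass plus a
-- binary search for the cut index (lengths are nonnegative, so suffix sums are monotone);
-- objective: alternative algorithm, same return value.

-- ===== PORT A =====
-- for role, content in reversed(pairs): ...  (acc appended at the end; break on overflow)
def lwA_loop (budget : Int) : List (String × String) → List (String × String) → Int → List (String × String)
  | [], acc, _ => acc
  | (role, content) :: rest, acc, used =>
    let L : Int := PySem.Str.len content
    if used + L > budget then
      (if acc = [] ∧ budget > 200 then acc ++ [(role, PySem.Str.slice content (some (-budget)) none)] else acc)
    else lwA_loop budget rest (acc ++ [(role, content)]) (used + L)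

def last_window_py (pairs : List (String × String)) (budget : Int) : List (String × String) :=
  (lwA_loop budget pairs.reverse [] 0).reverse

-- ===== PORT B =====
-- prefix = [0]; for _, content in pairs: prefix.append(prefix[-1] + len(content))
def lwB_prefixFold (pairs : List (String × String)) : List Int :=
  pairs.foldl (fun pre rc => pre ++ [((PySem.List.pyGet? pre (-1)).getD 0) + PySem.Str.len rc.2]) [0]

-- hand-written binary search of Source B: smallest i in [lo,hi) with prefix[i] >= need, else hi
-- (prefix[mid] is always in range in Python; the getD default is never used)
def lwB_bsearch (pre : List Int) (need : Int) (lo hi : Nat) : Nat :=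
  if _h : lo < hi then
    let mid := (lo + hi) / 2
    if pre.getD mid 0 ≥ need then lwB_bsearch pre need lo mid
    else lwB_bsearch pre need (mid + 1) hi
  else lo
termination_by hi - lo
decreasing_by all_goals omega

def last_window_py_alt (pairs : List (String × String)) (budget : Int) : List (String × String) :=
  let n := pairs.length
  let pre := lwB_prefixFold pairs
  let total := pre.getD n 0
  let lo := lwB_bsearch pre (total - budget) 0 (n + 1)
  if lo ≥ n then
    if n > 0 ∧ budget > 200 then
      match PySem.List.pyGet? pairs (-1) with
      | some (role, content) => [(role, PySem.Str.slice content (some (-budget)) none)]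
      | none => []
    else []
  else PySem.List.slice pairs (some (lo : Int)) none

-- ===== PRECONDITION & SPEC =====
def Spec_last_window_py (pairs : List (String × String)) (budget : Int) (out : List (String × String)) : Prop := out = last_window_py_alt pairs budget
instance (pairs : List (String × String)) (budget : Int) (out : List (String × String)) : Decidable (Spec_last_window_py pairs budget out) := by unfold Spec_last_window_py; infer_instance

-- ===== CLAIM (what is proved, stated in full; the proofs are below) =====
def Claim_equal_last_window_py : Prop := ∀ (pairs : List (String × String)) (budget : Int), Dom_last_window_py pairs budget → Spec_last_window_py pairs budget (last_window_py pairs budget)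

-- ===== LEMMAS AND PROOFS =====

-- proof-only helpers --------------------------------------------------------

-- number of trailing steps A's loop takes (proof-side characterisation of A)
def lwCount (budget : Int) : List (String × String) → Int → Nat
  | [], _ => 0
  | (_, content) :: rest, total =>
    let t := total + PySem.Str.len content
    if t > budget then 0 else lwCount budget rest t + 1

-- structural form of the prefix-sum list
def lwPre (t : Int) : List (String × String) → List Int
  | [] => [t]
  | (_, c) :: rest => t :: lwPre (t + PySem.Str.len c) rest

-- lengths are nonnegative
lemma str_len_nonneg (s : String) : 0 ≤ PySem.Str.len s := by
  simp [PySem.Str.len_eq]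

-- A equals: count the fitting trailing pairs, then drop
lemma lwCount_le (budget : Int) (l : List (String × String)) (t : Int) :
    lwCount budget l t ≤ l.length := by
  induction l generalizing t with
  | nil => simp [lwCount]
  | cons x rest ih =>
    obtain ⟨r, c⟩ := x
    simp only [lwCount, List.length_cons]
    split
    · omega
    · have := ih (t + PySem.Str.len c); omega

lemma lwA_loop_eq_take (budget : Int) (l : List (String × String))
    (acc : List (String × String)) (used : Int)
    (h : acc ≠ [] ∨ ¬ budget > 200) :
    lwA_loop budget l acc used = acc ++ l.take (lwCount budget l used) := by
  induction l generalizing acc used with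
  | nil => simp [lwA_loop, lwCount]
  | cons x rest ih =>
    obtain ⟨r, c⟩ := x
    simp only [lwA_loop, lwCount]
    by_cases hov : used + PySem.Str.len c > budget
    · simp only [hov, if_pos]
      have hcond : ¬ (acc = [] ∧ budget > 200) := by
        rcases h with h | h
        · intro ⟨h1, _⟩; exact h h1
        · intro ⟨_, h2⟩; exact h h2
      simp [hcond]
    · simp only [hov, if_false]
      rw [ih (acc ++ [(r, c)]) (used + PySem.Str.len c) (Or.inl (by simp))]
      simp

lemma reverse_take_reverse (l : List (String × String)) (k : Nat) (hk : k ≤ l.length) :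
    (l.reverse.take k).reverse = l.drop (l.length - k) := by
  rw [← List.reverse_reverse (l.drop (l.length - k)), List.reverse_drop]
  congr 2
  omega

-- A = mid form
lemma A_eq_mid (pairs : List (String × String)) (budget : Int) :
    last_window_py pairs budget =
      (let n := pairs.length
       let k := lwCount budget pairs.reverse 0
       if k = 0 ∧ n > 0 ∧ budget > 200 then
         match PySem.List.pyGet? pairs (-1) with
         | some (role, content) => [(role, PySem.Str.slice content (some (-budget)) none)]
         | none => []
       else pairs.drop (n - k)) := by
  show (lwA_loop budget pairs.reverse [] 0).reverse = _
  by_cases hb : budget > 200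
  · cases hrev : pairs.reverse with
    | nil =>
      have hp : pairs = [] := by simpa using congrArg List.reverse hrev
      subst hp
      simp [lwA_loop, lwCount]
    | cons x rest =>
      obtain ⟨r, c⟩ := x
      have hlast : PySem.List.pyGet? pairs (-1) = some (r, c) := by
        rw [PySem.List.pyGet?_neg_one, List.getLast?_eq_head?_reverse, hrev]; rfl
      have hlen : pairs.length = rest.length + 1 := by
        have := congrArg List.length hrev; simpa using this
      by_cases hov : 0 + PySem.Str.len c > budget
      · -- the last message alone overflows: both take the truncation fallback
        simp only [lwA_loop, lwCount, hov, if_true, List.nil_append]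
        simp [hb, hlen, hlast]
      · -- the last message fits
        simp only [lwA_loop, lwCount, hov, if_false]
        rw [lwA_loop_eq_take budget rest ([] ++ [(r, c)]) (0 + PySem.Str.len c)
          (Or.inl (by simp))]
        have hm : lwCount budget rest (0 + PySem.Str.len c) ≤ rest.length :=
          lwCount_le budget rest _
        rw [if_neg (by omega : ¬ (lwCount budget rest (0 + PySem.Str.len c) + 1 = 0
              ∧ pairs.length > 0 ∧ budget > 200))]
        have htake : (r, c) :: rest.take (lwCount budget rest (0 + PySem.Str.len c))
            = pairs.reverse.take (lwCount budget rest (0 + PySem.Str.len c) + 1) := by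
          rw [hrev]; rfl
        calc ([] ++ [(r, c)] ++ rest.take (lwCount budget rest (0 + PySem.Str.len c))).reverse
            = (pairs.reverse.take (lwCount budget rest (0 + PySem.Str.len c) + 1)).reverse := by
              rw [← htake]; simp
          _ = _ := reverse_take_reverse pairs _ (by omega)
  · -- budget ≤ 200: the fallback never fires on either side
    have hkle : lwCount budget pairs.reverse 0 ≤ pairs.length := by
      have := lwCount_le budget pairs.reverse 0
      simpa using this
    rw [lwA_loop_eq_take budget pairs.reverse [] 0 (Or.inr hb),
      if_neg (by intro h; exact hb h.2.2)]
    simpa using reverse_take_reverse pairs _ hkle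

-- prefix fold equals structural prefix sums
lemma prefixFold_aux (l : List (String × String)) (pre : List Int) (t : Int) :
    List.foldl (fun pre rc => pre ++ [((PySem.List.pyGet? pre (-1)).getD 0) + PySem.Str.len rc.2])
      (pre ++ [t]) l = pre ++ lwPre t l := by
  induction l generalizing pre t with
  | nil => simp [lwPre]
  | cons x rest ih =>
    obtain ⟨r, c⟩ := x
    simp only [List.foldl_cons, PySem.List.pyGet?_neg_one_append_singleton, Option.getD_some]
    rw [ih (pre ++ [t]) (t + PySem.Str.len c)]
    simp [lwPre]

lemma prefixFold_eq (pairs : List (String × String)) :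
    lwB_prefixFold pairs = lwPre 0 pairs := by
  have := prefixFold_aux pairs [] 0
  simpa [lwB_prefixFold] using this

-- prefix values
lemma lwPre_getD (t : Int) (l : List (String × String)) (i : Nat) (hi : i ≤ l.length) :
    (lwPre t l).getD i 0 = t + ((l.take i).map (fun rc => PySem.Str.len rc.2)).sum := by
  induction l generalizing t i with
  | nil => simp only [List.length_nil, Nat.le_zero] at hi; subst hi; simp [lwPre]
  | cons x rest ih =>
    obtain ⟨r, c⟩ := x
    cases i with
    | zero => simp [lwPre]
    | succ j =>
      simp only [lwPre, List.getD_cons_succ, List.take_succ_cons, List.map_cons, List.sum_cons]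
      rw [ih _ j (by simpa using hi)]
      ring

-- prefix is monotone
lemma lwPre_mono (t : Int) (l : List (String × String)) (i j : Nat)
    (hij : i ≤ j) (hj : j ≤ l.length) :
    (lwPre t l).getD i 0 ≤ (lwPre t l).getD j 0 := by
  rw [lwPre_getD t l i (le_trans hij hj), lwPre_getD t l j hj]
  have : ((l.take i).map (fun rc => PySem.Str.len rc.2)).sum ≤
      ((l.take j).map (fun rc => PySem.Str.len rc.2)).sum := by
    have hj' : j = i + (j - i) := by omega
    rw [hj', List.take_add, List.map_append, List.sum_append]
    have h0 : 0 ≤ ((((l.drop i).take (j - i))).map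
        (fun rc => PySem.Str.len rc.2)).sum := by
      apply List.sum_nonneg
      intro x hx
      obtain ⟨rc, _, rfl⟩ := List.mem_map.mp hx
      exact str_len_nonneg rc.2
    omega
  omega

-- binary-search spec (for a predicate monotone below hi0)
lemma bsearch_spec_aux (pre : List Int) (need : Int) (hi0 : Nat)
    (hmono : ∀ i j, i ≤ j → j < hi0 → pre.getD i 0 ≥ need → pre.getD j 0 ≥ need) :
    ∀ (fuel lo hi : Nat), hi - lo ≤ fuel → lo ≤ hi → hi ≤ hi0 →
    lo ≤ lwB_bsearch pre need lo hi ∧ lwB_bsearch pre need lo hi ≤ hi ∧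
      (∀ j, lo ≤ j → j < lwB_bsearch pre need lo hi → ¬ pre.getD j 0 ≥ need) ∧
      (lwB_bsearch pre need lo hi < hi → pre.getD (lwB_bsearch pre need lo hi) 0 ≥ need) := by
  intro fuel
  induction fuel with
  | zero =>
    intro lo hi hf hlh hh0
    have : lo = hi := by omega
    subst this
    have e : lwB_bsearch pre need lo lo = lo := by rw [lwB_bsearch]; simp
    rw [e]
    exact ⟨le_refl _, le_refl _, fun j h1 h2 => absurd h2 (by omega),
      fun h => absurd h (by omega)⟩
  | succ m ih =>
    intro lo hi hf hlh hh0
    rw [lwB_bsearch]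
    by_cases hlt : lo < hi
    · simp only [hlt, dif_pos]
      have hmid1 : lo ≤ (lo + hi) / 2 := by omega
      have hmid2 : (lo + hi) / 2 < hi := by omega
      by_cases hp : pre.getD ((lo + hi) / 2) 0 ≥ need
      · simp only [hp, if_pos]
        obtain ⟨h1, h2, h3, h4⟩ := ih lo ((lo + hi) / 2) (by omega) hmid1 (by omega)
        refine ⟨h1, by omega, h3, ?_⟩
        intro hr
        by_cases hre : lwB_bsearch pre need lo ((lo + hi) / 2) < (lo + hi) / 2
        · exact h4 hre
        · have : lwB_bsearch pre need lo ((lo + hi) / 2) = (lo + hi) / 2 := by omega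
          rw [this]; exact hp
      · simp only [hp, if_false]
        obtain ⟨h1, h2, h3, h4⟩ := ih ((lo + hi) / 2 + 1) hi (by omega) (by omega) hh0
        refine ⟨by omega, h2, ?_, h4⟩
        intro j hj hjr hPj
        by_cases hjm : (lo + hi) / 2 + 1 ≤ j
        · exact h3 j hjm hjr hPj
        · exact hp (hmono j ((lo + hi) / 2) (by omega) (by omega) hPj)
    · have e : lwB_bsearch pre need lo hi = lo := by rw [lwB_bsearch]; simp [hlt]
      rw [← lwB_bsearch, e]
      exact ⟨le_refl _, hlh, fun j h1 h2 => absurd h2 (by omega), fun h => absurd h hlt⟩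

-- count spec: every counted suffix fits …
lemma lwCount_fits (budget : Int) (l : List (String × String)) (t : Int) (k : Nat)
    (hk1 : 1 ≤ k) (hk : k ≤ lwCount budget l t) :
    t + ((l.take k).map (fun rc => PySem.Str.len rc.2)).sum ≤ budget := by
  induction l generalizing t k with
  | nil =>
    have := lwCount_le budget ([] : List (String × String)) t
    simp [lwCount] at hk
    omega
  | cons x rest ih =>
    obtain ⟨r, c⟩ := x
    simp only [lwCount] at hk
    by_cases hov : t + PySem.Str.len c > budget
    · rw [if_pos hov] at hk; omega
    · rw [if_neg hov] at hk
      cases k with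
      | zero => omega
      | succ j =>
        cases j with
        | zero => simpa using hov
        | succ m =>
          have := ih (t + PySem.Str.len c) (m + 1) (by omega) (by omega)
          simp only [List.take_succ_cons, List.map_cons, List.sum_cons]
          omega

-- … and anything beyond overflows
lemma lwCount_overflow (budget : Int) (l : List (String × String)) (t : Int) (k : Nat)
    (hk : lwCount budget l t < k) (hkl : k ≤ l.length) :
    t + ((l.take k).map (fun rc => PySem.Str.len rc.2)).sum > budget := by
  induction l generalizing t k with
  | nil => simp at hkl; omega
  | cons x rest ih =>
    obtain ⟨r, c⟩ := x
    simp only [lwCount] at hk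
    cases k with
    | zero => omega
    | succ j =>
      simp only [List.take_succ_cons, List.map_cons, List.sum_cons]
      by_cases hov : t + PySem.Str.len c > budget
      · have h0 : 0 ≤ ((rest.take j).map (fun rc => PySem.Str.len rc.2)).sum := by
          apply List.sum_nonneg
          intro x hx
          obtain ⟨rc, _, rfl⟩ := List.mem_map.mp hx
          exact str_len_nonneg rc.2
        omega
      · simp only [hov, if_false] at hk
        have := ih (t + PySem.Str.len c) j (by omega) (by simpa using hkl)
        omega

-- suffix sums vs prefix sums
lemma suffix_sum_eq (l : List (String × String)) (k : Nat) (hk : k ≤ l.length) :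
    ((l.reverse.take k).map (fun rc => PySem.Str.len rc.2)).sum =
      (l.map (fun rc => PySem.Str.len rc.2)).sum -
        ((l.take (l.length - k)).map (fun rc => PySem.Str.len rc.2)).sum := by
  have h1 : l.reverse.take k = (l.drop (l.length - k)).reverse := by
    have := reverse_take_reverse l k hk
    calc l.reverse.take k = (l.reverse.take k).reverse.reverse := by simp
      _ = (l.drop (l.length - k)).reverse := by rw [this]
  rw [h1, List.map_reverse, List.sum_reverse]
  have h2 : (l.map (fun rc => PySem.Str.len rc.2)).sum =
      ((l.take (l.length - k)).map (fun rc => PySem.Str.len rc.2)).sum +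
        ((l.drop (l.length - k)).map (fun rc => PySem.Str.len rc.2)).sum := by
    rw [← List.sum_append, ← List.map_append, List.take_append_drop]
  omega

-- the binary search lands exactly at n - k
lemma bsearch_eq (pairs : List (String × String)) (budget : Int) :
    min (lwB_bsearch (lwB_prefixFold pairs) ((lwB_prefixFold pairs).getD pairs.length 0 - budget) 0 (pairs.length + 1)) pairs.length
      = pairs.length - lwCount budget pairs.reverse 0 := by
  rw [prefixFold_eq]
  set n := pairs.length with hn
  set S : Nat → Int := fun i => ((pairs.take i).map (fun rc => PySem.Str.len rc.2)).sum with hS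
  have hget : ∀ i, i ≤ n → (lwPre 0 pairs).getD i 0 = S i := by
    intro i hi
    rw [lwPre_getD 0 pairs i hi]
    simp [hS]
  rw [hget n (le_refl n)]
  set need := S n - budget with hneed
  set k := lwCount budget pairs.reverse 0 with hk
  have hkn : k ≤ n := by
    have := lwCount_le budget pairs.reverse 0
    simpa [hn] using this
  have hmono : ∀ i j, i ≤ j → j < n + 1 →
      (lwPre 0 pairs).getD i 0 ≥ need → (lwPre 0 pairs).getD j 0 ≥ need := by
    intro i j hij hj hi
    have := lwPre_mono 0 pairs i j hij (by omega)
    omega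
  obtain ⟨h1, h2, h3, h4⟩ := bsearch_spec_aux (lwPre 0 pairs) need (n + 1) hmono
    (n + 1) 0 (n + 1) (by omega) (by omega) (le_refl _)
  set r := lwB_bsearch (lwPre 0 pairs) need 0 (n + 1) with hr
  have hfit : 1 ≤ k → S (n - k) ≥ need := by
    intro h1k
    have hfits := lwCount_fits budget pairs.reverse 0 k h1k (le_refl _)
    rw [suffix_sum_eq pairs k hkn, ← hn] at hfits
    have e1 : (pairs.map (fun rc => PySem.Str.len rc.2)).sum = S n := by
      simp only [hS]
      rw [hn, List.take_length]
    have e2 : ((pairs.take (n - k)).map (fun rc => PySem.Str.len rc.2)).sum = S (n - k) := by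
      simp only [hS]
    omega
  have hovf : ∀ j, j < n - k → ¬ (lwPre 0 pairs).getD j 0 ≥ need := by
    intro j hj hP
    rw [hget j (by omega)] at hP
    have hov := lwCount_overflow budget pairs.reverse 0 (n - j) (by omega)
      (by simp only [List.length_reverse]; omega)
    have hss := suffix_sum_eq pairs (n - j) (by omega)
    rw [hss, ← hn] at hov
    have he : n - (n - j) = j := by omega
    rw [he] at hov
    have e1 : (pairs.map (fun rc => PySem.Str.len rc.2)).sum = S n := by
      simp only [hS]
      rw [hn, List.take_length]
    have e2 : ((pairs.take j).map (fun rc => PySem.Str.len rc.2)).sum = S j := by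
      simp only [hS]
    omega
  by_cases hk0 : k = 0
  · have hrn : n ≤ r := by
      by_contra h
      push_neg at h
      exact hovf r (by omega) (h4 (by omega))
    omega
  · have hP : (lwPre 0 pairs).getD (n - k) 0 ≥ need := by
      rw [hget _ (by omega)]
      exact hfit (by omega)
    have hub : r ≤ n - k := by
      by_contra h
      push_neg at h
      exact h3 (n - k) (by omega) (by omega) hP
    have hlb : n - k ≤ r := by
      by_contra h
      push_neg at h
      exact hovf r (by omega) (h4 (by omega))
    omega

theorem last_window_eq (pairs : List (String × String)) (budget : Int) :
    last_window_py pairs budget = last_window_py_alt pairs budget := by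
  rw [A_eq_mid]
  simp only [last_window_py_alt]
  have hbe := bsearch_eq pairs budget
  set n := pairs.length with hn
  set k := lwCount budget pairs.reverse 0 with hk
  set r := lwB_bsearch (lwB_prefixFold pairs)
    ((lwB_prefixFold pairs).getD n 0 - budget) 0 (n + 1) with hr
  have hkn : k ≤ n := by
    have := lwCount_le budget pairs.reverse 0
    simpa [hn] using this
  by_cases hge : r ≥ n
  · have hk0 : k = 0 := by omega
    rw [if_pos hge]
    by_cases hc : n > 0 ∧ budget > 200
    · rw [if_pos hc, if_pos ⟨hk0, hc.1, hc.2⟩]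
    · rw [if_neg hc, if_neg (by intro h; exact hc ⟨h.2.1, h.2.2⟩)]
      simp [hk0, hn]
  · have hrk : r = n - k := by omega
    have hk1 : k ≠ 0 := by omega
    rw [if_neg hge, if_neg (by intro h; exact hk1 h.1)]
    rw [PySem.List.slice_from_natCast, hrk]

-- ===== VERDICT (by name: the statement is the Claim_ definition above) =====
theorem last_window_py_spec : Claim_equal_last_window_py := by
  intro pairs budget _
  unfold Spec_last_window_py
  exact last_window_eq pairs budget
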